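-- pv_equiv track=rewrite | github.com/OCHA-DAP/hdx-python-utilities | src/hdx/utilities/dictandlist.py | list_distribute_contents_simple
-- ===== SOURCE A (Python) =====
-- from typing import Any, Callable, Dict, List, Mapping, MutableMapping, Union
--
-- def dict_of_lists_add(
--     dictionary: MutableMapping, key: Any, value: Any
-- ) -> None:
--     """Add value to a list in a dictionary by key
--
--     Args:
--         dictionary (MutableMapping): Dictionary to which to add values
--         key (Any): Key within dictionary
--         value (Any): Value to add to list in dictionary
--
--     Returns:
--         None
--
--     """
--     list_objs = dictionary.get(key, list())
--     list_objs.append(value)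
--     dictionary[key] = list_objs
--
-- def list_distribute_contents_simple(
--     input_list: List, function: Callable[[Any], Any] = lambda x: x
-- ) -> List:
--     """Distribute the contents of a list eg. [1, 1, 1, 2, 2, 3] -> [1, 2, 3, 1, 2, 1]. List can contain complex types
--     like dictionaries in which case the function can return the appropriate value eg.  lambda x: x[KEY]
--
--     Args:
--         input_list (List): List to distribute values
--         function (Callable[[Any], Any]): Return value to use for distributing. Defaults to lambda x: x.
--
--     Returns:
--         List: Distributed list
--
--     """
--     dictionary = dict()
--     for obj in input_list:
--         dict_of_lists_add(dictionary, function(obj), obj)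
--     output_list = list()
--     i = 0
--     done = False
--     while not done:
--         found = False
--         for key in sorted(dictionary):
--             if i < len(dictionary[key]):
--                 output_list.append(dictionary[key][i])
--                 found = True
--         if found:
--             i += 1
--         else:
--             done = True
--     return output_list
-- ===== SOURCE B (Python) =====
-- def list_distribute_contents_simple(input_list, function=lambda x: x):
--     seen = {}
--     tagged = []
--     for obj in input_list:
--         key = function(obj)
--         idx = seen.get(key, 0)
--         seen[key] = idx + 1
--         tagged.append((idx, key, obj))
--     tagged.sort(key=lambda t: (t[0], t[1]))
--     return [obj for _, _, obj in tagged]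
-- ===== Notes on version B (the rewrite author's own statement) =====
-- stated objective: faster
-- what changed: A groups values into per-key lists and then repeatedly re-sorts the keys and scans all groups once per round until a round finds nothing; B makes one pass tagging each element with its running occurrence index, sorts the tags once by (occurrence index, key), and reads the elements off.
import Mathlib
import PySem

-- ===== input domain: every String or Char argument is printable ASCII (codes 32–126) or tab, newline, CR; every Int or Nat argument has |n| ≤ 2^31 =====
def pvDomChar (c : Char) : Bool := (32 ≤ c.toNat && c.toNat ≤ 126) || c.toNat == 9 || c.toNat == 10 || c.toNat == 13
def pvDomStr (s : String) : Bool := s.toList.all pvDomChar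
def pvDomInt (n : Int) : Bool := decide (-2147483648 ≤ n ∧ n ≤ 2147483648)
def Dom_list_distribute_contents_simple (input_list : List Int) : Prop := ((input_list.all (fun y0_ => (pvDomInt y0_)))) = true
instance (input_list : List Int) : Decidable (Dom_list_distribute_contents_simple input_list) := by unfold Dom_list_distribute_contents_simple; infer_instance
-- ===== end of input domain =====

-- B replaces A's repeated sorted-key round scans with one tag-and-sort pass: tag each element with its
-- running occurrence index, sort the tags by (index, key), and read the elements off.

-- ===== PORT A =====
-- dict_of_lists_add: list_objs = dictionary.get(key, []); list_objs.append(value); dictionary[key] = list_objs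
-- (Dict.modify IS get-with-default / transform / store-back)
def pvA_add (d : PySem.Dict Int (List Int)) (key : Int) (value : Int) : PySem.Dict Int (List Int) :=
  d.modify key [] (fun list_objs => list_objs ++ [value])

-- one pass of 'for key in sorted(dictionary): if i < len(dictionary[key]): output_list.append(dictionary[key][i]); found = True'
-- dictionary[key] is ported as getD key [] (the key is drawn from the dict, so it is present) and
-- dictionary[key][i] as List.getD i 0 (guarded by i < len, so in range).
def pvA_round (d : PySem.Dict Int (List Int)) (i : Nat) (st : List Int × Bool) : List Int × Bool :=
  (PySem.List.sorted d.keys (fun x => x) false).foldl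
    (fun st key =>
      if i < (d.getD key []).length then (st.1 ++ [(d.getD key []).getD i 0], true) else st)
    st

-- the 'while not done' loop; fuel only makes it total (input_list.length + 1 always suffices: the
-- loop stops at the first i no list reaches, and every list has length ≤ input_list.length).
def pvA_loop (d : PySem.Dict Int (List Int)) (out : List Int) (i : Nat) : Nat → List Int
  | 0 => out
  | fuel + 1 =>
    let r := pvA_round d i (out, false)
    if r.2 then pvA_loop d r.1 (i + 1) fuel else r.1

def list_distribute_contents_simple (input_list : List Int) : List Int :=
  let dictionary := input_list.foldl (fun d obj => pvA_add d obj obj) PySem.Dict.empty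
  pvA_loop dictionary [] 0 (input_list.length + 1)

-- ===== PORT B =====
-- one pass: tag each obj with its running occurrence index (seen dict), collecting (idx, key, obj)
def pvB_tagStep (st : PySem.Dict Int Int × List (Int × Int × Int)) (obj : Int) :
    PySem.Dict Int Int × List (Int × Int × Int) :=
  let key := obj
  let idx := st.1.getD key 0
  (st.1.insert key (idx + 1), st.2 ++ [(idx, key, obj)])

def list_distribute_contents_simple_alt (input_list : List Int) : List Int :=
  let tagged := (input_list.foldl pvB_tagStep (PySem.Dict.empty, [])).2
  (PySem.List.sorted2 tagged (fun t => t.1) (fun t => t.2.1)).map (fun t => t.2.2)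

-- ===== PRECONDITION & SPEC =====
def Spec_list_distribute_contents_simple (input_list : List Int) (out : List Int) : Prop := out = list_distribute_contents_simple_alt input_list
instance (input_list : List Int) (out : List Int) : Decidable (Spec_list_distribute_contents_simple input_list out) := by unfold Spec_list_distribute_contents_simple; infer_instance

-- ===== CLAIM (what is proved, stated in full; the proofs are below) =====
def Claim_equal_list_distribute_contents_simple : Prop := ∀ (input_list : List Int), Dom_list_distribute_contents_simple input_list → Spec_list_distribute_contents_simple input_list (list_distribute_contents_simple input_list)

-- ===== LEMMAS AND PROOFS =====

-- the sorted distinct keys of l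
def pvK (l : List Int) : List Int := PySem.List.sorted (PySem.Set.ofList l) (fun x => x) false

-- round j's output: the sorted keys whose multiplicity exceeds j
def pvOut (l : List Int) (j : Nat) : List Int := (pvK l).filter (fun k => decide (j < l.count k))

-- canonical tagged list, grouped by occurrence index
def pvCt (l : List Int) : List (Int × Int × Int) :=
  ((List.range (l.length + 1)).map (fun j => (pvOut l j).map (fun k => ((j : Int), k, k)))).flatten

lemma pv_bd_getD (l : List Int) : ∀ (d : PySem.Dict Int (List Int)) (k : Int),
    (l.foldl (fun d obj => pvA_add d obj obj) d).getD k [] = d.getD k [] ++ List.replicate (l.count k) k := by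
  induction l with
  | nil => intro d k; simp
  | cons x t ih =>
    intro d k
    rw [List.foldl_cons, ih, List.count_cons]
    simp only [pvA_add, PySem.Dict.getD_modify]
    by_cases h : k = x
    · subst h
      simp only [if_true, List.append_assoc]
      simp [List.replicate_succ]
    · have h' : ¬ x = k := fun e => h e.symm
      simp [h, h']

lemma pv_bd_keys (l : List Int) :
    (l.foldl (fun d obj => pvA_add d obj obj) PySem.Dict.empty).keys = PySem.Set.ofList l := by
  simp only [pvA_add]
  rw [PySem.Dict.keys_foldl_modify l [] (fun _ x => fun list_objs => list_objs ++ [x]) PySem.Dict.empty]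
  rfl

lemma pv_K_mem (l : List Int) (k : Int) : k ∈ pvK l ↔ k ∈ l := by
  unfold pvK
  rw [(PySem.List.sorted_perm _ _ _).mem_iff, PySem.Set.mem_ofList]

lemma pv_K_pairwise (l : List Int) : (pvK l).Pairwise (· < ·) :=
  PySem.List.sorted_ofList_pairwise_lt l

lemma pv_K_nodup (l : List Int) : (pvK l).Nodup :=
  (pv_K_pairwise l).imp ne_of_lt

lemma pv_round_fold (l : List Int) (d : PySem.Dict Int (List Int))
    (hd : ∀ k, d.getD k [] = List.replicate (l.count k) k) (i : Nat) :
    ∀ (ks : List Int) (out : List Int) (fnd : Bool),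
    ks.foldl (fun st key =>
        if i < (d.getD key []).length then (st.1 ++ [(d.getD key []).getD i 0], true) else st) (out, fnd)
      = (out ++ ks.filter (fun k => decide (i < l.count k)), fnd || ks.any (fun k => decide (i < l.count k))) := by
  intro ks
  induction ks with
  | nil => intro out fnd; simp
  | cons k ks ih =>
    intro out fnd
    rw [List.foldl_cons]
    by_cases h : i < l.count k
    · have hlen : i < (d.getD k []).length := by rw [hd]; simpa using h
      have he : (d.getD k []).getD i 0 = k := by
        rw [hd, List.getD_eq_getElem?_getD, List.getElem?_replicate, if_pos h]
        rfl
      rw [if_pos hlen, he, ih]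
      simp [List.any_cons, h]
    · have hlen : ¬ i < (d.getD k []).length := by rw [hd]; simpa using h
      rw [if_neg hlen, ih]
      simp [List.any_cons, h]

lemma pv_round_spec (l : List Int) (i : Nat) (out : List Int) (fnd : Bool) :
    pvA_round (l.foldl (fun d obj => pvA_add d obj obj) PySem.Dict.empty) i (out, fnd)
      = (out ++ pvOut l i, fnd || (pvK l).any (fun k => decide (i < l.count k))) := by
  unfold pvA_round pvOut
  rw [pv_bd_keys]
  exact pv_round_fold l _ (fun k => by rw [pv_bd_getD]; simp) i (pvK l) out fnd

lemma pv_loop_spec (l : List Int) : ∀ (fuel i : Nat) (out : List Int),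
    (∀ k : Int, l.count k ≤ i + fuel) →
    pvA_loop (l.foldl (fun d obj => pvA_add d obj obj) PySem.Dict.empty) out i fuel
      = out ++ ((List.range fuel).map (fun j => pvOut l (i + j))).flatten := by
  intro fuel
  induction fuel with
  | zero => intro i out _; simp [pvA_loop]
  | succ fuel ih =>
    intro i out hcnt
    rw [pvA_loop, pv_round_spec]
    simp only [Bool.false_or]
    by_cases hany : (pvK l).any (fun k => decide (i < l.count k)) = true
    · rw [if_pos hany, ih (i + 1) _ (fun k => by have := hcnt k; omega)]
      rw [List.range_succ_eq_map]
      simp only [List.map_cons, List.map_map, List.flatten_cons, Nat.add_zero, List.append_assoc]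
      congr 2
      apply congrArg
      apply List.map_congr_left
      intro j _
      simp only [Function.comp_apply, Nat.succ_eq_add_one]
      congr 1
      omega
    · rw [if_neg hany]
      have hall : ∀ k ∈ pvK l, l.count k ≤ i := by
        intro k hk
        have := List.any_eq_false.mp (Bool.not_eq_true _ ▸ hany) k hk
        simpa using this
      have hnil : ∀ j, i ≤ j → pvOut l j = [] := by
        intro j hj
        apply List.filter_eq_nil_iff.mpr
        intro k hk
        have := hall k hk
        simp only [decide_eq_true_eq]
        omega
      rw [hnil i (le_refl i)]
      have : ((List.range (fuel + 1)).map (fun j => pvOut l (i + j))).flatten = [] := by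
        apply List.flatten_eq_nil_iff.mpr
        intro xs hxs
        obtain ⟨j, _, rfl⟩ := List.mem_map.mp hxs
        exact hnil (i + j) (by omega)
      rw [this]

lemma pv_A_eq (l : List Int) :
    list_distribute_contents_simple l
      = ((List.range (l.length + 1)).map (fun j => pvOut l j)).flatten := by
  unfold list_distribute_contents_simple
  rw [pv_loop_spec l (l.length + 1) 0 [] (fun k => by have := List.count_le_length (a := k) (l := l); omega)]
  simp

lemma pv_tag_count (l : List Int) : ∀ (d : PySem.Dict Int Int) (acc : List (Int × Int × Int)) (t : Int × Int × Int),
    ((l.foldl pvB_tagStep (d, acc)).2).count t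
      = acc.count t + (if t.2.2 = t.2.1 ∧ d.getD t.2.1 0 ≤ t.1 ∧ t.1 < d.getD t.2.1 0 + (l.count t.2.1 : Int) then 1 else 0) := by
  induction l with
  | nil =>
    intro d acc t
    simp only [List.foldl_nil, List.count_nil, Int.natCast_zero, Int.add_zero]
    split_ifs with h
    · exfalso; omega
    · rfl
  | cons x xs ih =>
    intro d acc t
    rw [List.foldl_cons]
    show ((xs.foldl pvB_tagStep
        (d.insert x (d.getD x 0 + 1), acc ++ [(d.getD x 0, x, x)])).2).count t = _
    rw [ih]
    obtain ⟨i, k, v⟩ := t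
    simp only [List.count_append, List.count_cons, List.count_nil, PySem.Dict.getD_insert,
      beq_iff_eq, Prod.mk.injEq]
    push_cast
    by_cases hk : k = x
    · subst hk
      by_cases hv : v = k
      · subst hv
        by_cases hi : i = d.getD v 0
        · subst hi
          simp only [and_true, true_and]
          split_ifs <;> omega
        · simp only [true_and]
          split_ifs <;> omega
      · simp only [hv, false_and, if_false]
        split_ifs <;> omega
    · have hk' : ¬ (i = d.getD x 0 ∧ k = x ∧ v = x) := fun h => hk h.2.1
      simp only [hk, if_false]
      split_ifs <;> omega

lemma pv_sum_single (N : Nat) (f : Nat → Nat) (a : Nat) (h : ∀ j, j ≠ a → f j = 0) :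
    ((List.range N).map f).sum = if a < N then f a else 0 := by
  induction N with
  | zero => simp
  | succ n ih =>
    rw [List.range_succ]
    simp only [List.map_append, List.sum_append, ih, List.map_cons, List.map_nil, List.sum_cons,
      List.sum_nil]
    by_cases hn : a = n
    · subst hn
      simp
    · rw [h n (fun e => hn e.symm)]
      by_cases ha : a < n
      · have h1 : a < n + 1 := by omega
        simp [ha, h1]
      · have h1 : ¬ a < n + 1 := by omega
        simp [ha, h1]

lemma pv_Out_nodup (l : List Int) (j : Nat) : (pvOut l j).Nodup :=
  (pv_K_nodup l).filter _

lemma pv_block_count (l : List Int) (j : Nat) (t : Int × Int × Int) :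
    ((pvOut l j).map (fun k => ((j : Int), k, k))).count t
      = if t.1 = (j : Int) ∧ t.2.2 = t.2.1 ∧ t.2.1 ∈ pvK l ∧ j < l.count t.2.1 then 1 else 0 := by
  obtain ⟨i, k, v⟩ := t
  dsimp only
  by_cases h : i = (j : Int) ∧ v = k ∧ k ∈ pvK l ∧ j < l.count k
  · obtain ⟨h1, h2, h3, h4⟩ := h
    subst h1; subst h2
    rw [if_pos ⟨rfl, rfl, h3, h4⟩]
    apply List.count_eq_one_of_mem
    · refine (pv_Out_nodup l j).map (fun a b e => ?_)
      have := congrArg (fun p => p.2.1) e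
      simpa using this
    · exact List.mem_map.mpr ⟨v, List.mem_filter.mpr ⟨h3, by simpa using h4⟩, rfl⟩
  · rw [if_neg h]
    apply List.count_eq_zero_of_not_mem
    intro hm
    obtain ⟨k', hk', he⟩ := List.mem_map.mp hm
    obtain ⟨hk'K, hk'c⟩ := List.mem_filter.mp hk'
    obtain ⟨e1, e2, e3⟩ : (j : Int) = i ∧ k' = k ∧ k' = v := by
      simpa using he
    subst e2
    exact h ⟨e1.symm, e3.symm, hk'K, by simpa using hk'c⟩

lemma pv_tagged_count (l : List Int) (t : Int × Int × Int) :
    ((l.foldl pvB_tagStep (PySem.Dict.empty, [])).2).count t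
      = if t.2.2 = t.2.1 ∧ 0 ≤ t.1 ∧ t.1 < (l.count t.2.1 : Int) then 1 else 0 := by
  rw [pv_tag_count]
  simp [PySem.Dict.getD_empty]

lemma pv_Ct_count (l : List Int) (t : Int × Int × Int) :
    (pvCt l).count t
      = if t.2.2 = t.2.1 ∧ 0 ≤ t.1 ∧ t.1 < (l.count t.2.1 : Int) then 1 else 0 := by
  unfold pvCt
  rw [List.count_flatten, List.map_map]
  obtain ⟨i, k, v⟩ := t
  dsimp only
  have hzero : ∀ j, j ≠ i.toNat →
      (List.count (i, k, v) ∘ fun j => (pvOut l j).map (fun k => ((j : Int), k, k))) j = 0 := by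
    intro j hj
    simp only [Function.comp_apply]
    rw [pv_block_count]
    apply if_neg
    rintro ⟨e1, -⟩
    apply hj
    omega
  rw [pv_sum_single (l.length + 1) _ i.toNat hzero]
  by_cases hG : v = k ∧ 0 ≤ i ∧ i < (l.count k : Int)
  · obtain ⟨h2, h0, hlt⟩ := hG
    have hmem : k ∈ pvK l := (pv_K_mem l k).mpr (List.count_pos_iff.mp (by omega))
    have hN : i.toNat < l.length + 1 := by
      have := List.count_le_length (a := k) (l := l); omega
    rw [if_pos hN]
    simp only [Function.comp_apply]
    rw [pv_block_count]
    dsimp only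
    rw [if_pos ⟨by omega, h2, hmem, by omega⟩, if_pos ⟨h2, h0, hlt⟩]
  · rw [if_neg hG]
    split_ifs with hN
    · simp only [Function.comp_apply]
      rw [pv_block_count]
      dsimp only
      apply if_neg
      rintro ⟨e1, e2, -, e4⟩
      exact hG ⟨e2, by omega, by omega⟩
    · rfl

lemma pv_Ct_perm (l : List Int) : ((l.foldl pvB_tagStep (PySem.Dict.empty, [])).2).Perm (pvCt l) :=
  List.perm_iff_count.mpr fun t => by rw [pv_tagged_count, pv_Ct_count]

lemma pv_Ct_pairwise (l : List Int) :
    (pvCt l).Pairwise (fun a b => (toLex (a.1, a.2.1) : Int ×ₗ Int) < toLex (b.1, b.2.1)) := by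
  unfold pvCt
  rw [List.pairwise_flatten]
  constructor
  · intro blk hblk
    obtain ⟨j, -, rfl⟩ := List.mem_map.mp hblk
    rw [List.pairwise_map]
    apply ((pv_K_pairwise l).filter _).imp
    intro a b hab
    rw [Prod.Lex.lt_iff]
    exact Or.inr ⟨rfl, hab⟩
  · rw [List.pairwise_map]
    apply List.pairwise_lt_range.imp
    intro j j' hjj' x hx y hy
    obtain ⟨kx, -, rfl⟩ := List.mem_map.mp hx
    obtain ⟨ky, -, rfl⟩ := List.mem_map.mp hy
    rw [Prod.Lex.lt_iff]
    exact Or.inl (by simpa using hjj')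

lemma pv_cmp_eq (a b : Int × Int × Int) :
    (decide (a.1 < b.1) || (!decide (b.1 < a.1) && decide (a.2.1 < b.2.1)))
      = decide ((toLex (a.1, a.2.1) : Int ×ₗ Int) < toLex (b.1, b.2.1)) := by
  have h : ((toLex (a.1, a.2.1) : Int ×ₗ Int) < toLex (b.1, b.2.1))
      ↔ (a.1 < b.1 ∨ (a.1 = b.1 ∧ a.2.1 < b.2.1)) := by
    rw [Prod.Lex.lt_iff]; rfl
  simp only [h]
  by_cases h1 : a.1 < b.1 <;> by_cases h2 : b.1 < a.1 <;> by_cases h3 : a.2.1 < b.2.1 <;>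
    simp [h1, h2, h3] <;> omega

lemma pv_sorted2_eq_lex (xs : List (Int × Int × Int)) :
    PySem.List.sorted2 xs (fun t => t.1) (fun t => t.2.1)
      = PySem.List.sorted xs (fun t => (toLex (t.1, t.2.1) : Int ×ₗ Int)) false := by
  simp only [PySem.List.sorted2, PySem.List.sorted]
  have : (fun (a b : Int × Int × Int) =>
        (decide (a.1 < b.1) || (!decide (b.1 < a.1) && decide (a.2.1 < b.2.1))))
      = fun a b => decide ((toLex (a.1, a.2.1) : Int ×ₗ Int) < toLex (b.1, b.2.1)) :=
    funext fun a => funext fun b => pv_cmp_eq a b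
  simp only [if_neg (by simp : ¬ (false = true))]
  rw [this]

lemma pv_B_eq (l : List Int) :
    list_distribute_contents_simple_alt l
      = ((List.range (l.length + 1)).map (fun j => pvOut l j)).flatten := by
  show (PySem.List.sorted2 ((l.foldl pvB_tagStep (PySem.Dict.empty, [])).2)
      (fun t => t.1) (fun t => t.2.1)).map (fun t => t.2.2)
    = ((List.range (l.length + 1)).map (fun j => pvOut l j)).flatten
  rw [pv_sorted2_eq_lex,
    PySem.List.sorted_eq_of_perm_of_pairwise_lt _ (pvCt l) _ (pv_Ct_perm l).symm (pv_Ct_pairwise l)]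
  unfold pvCt
  rw [List.map_flatten, List.map_map]
  congr 1
  apply List.map_congr_left
  intro j _
  simp [List.map_map, Function.comp_def]

-- ===== VERDICT (by name: the statement is the Claim_ definition above) =====
theorem list_distribute_contents_simple_spec : Claim_equal_list_distribute_contents_simple := by
  intro l _
  unfold Spec_list_distribute_contents_simple
  rw [pv_A_eq, pv_B_eq]
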